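-- pv_equiv track=rewrite | github.com/yoelcolque/logica | parcial/practica_final.py | elegir
-- ===== SOURCE A (Python) =====
-- def elegir(actividades, actividades_deseadas, costo):
--     MAX_COSTO = 8000
--     devolver = False
--     if costo <= MAX_COSTO:
--         condicion = 0
--         i = 0
--         while condicion < 3 and i < len(actividades):
--             j = 0
--             while condicion < 3 and j < len(actividades_deseadas):
--                 if actividades[i] == actividades_deseadas[j]:
--                     condicion += 1
--                 j += 1
--             i += 1
--         if condicion == 3:
--             devolver = True
--     return devolver
-- ===== SOURCE B (Python) =====
-- def elegir(actividades, actividades_deseadas, costo):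
--     if costo > 8000:
--         return False
--     cd = {}
--     for y in actividades_deseadas:
--         cd[y] = cd.get(y, 0) + 1
--     total = 0
--     for x in actividades:
--         total += cd.get(x, 0)
--     return total >= 3
-- ===== Notes on version B (the rewrite author's own statement) =====
-- stated objective: alternative
-- what changed: Replaces the bounded nested pair-scan (early exit at 3 matches) with a one-pass frequency table of the desired activities and a single accumulating pass over actividades, comparing the exact total pair count against 3.
import Mathlib
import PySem

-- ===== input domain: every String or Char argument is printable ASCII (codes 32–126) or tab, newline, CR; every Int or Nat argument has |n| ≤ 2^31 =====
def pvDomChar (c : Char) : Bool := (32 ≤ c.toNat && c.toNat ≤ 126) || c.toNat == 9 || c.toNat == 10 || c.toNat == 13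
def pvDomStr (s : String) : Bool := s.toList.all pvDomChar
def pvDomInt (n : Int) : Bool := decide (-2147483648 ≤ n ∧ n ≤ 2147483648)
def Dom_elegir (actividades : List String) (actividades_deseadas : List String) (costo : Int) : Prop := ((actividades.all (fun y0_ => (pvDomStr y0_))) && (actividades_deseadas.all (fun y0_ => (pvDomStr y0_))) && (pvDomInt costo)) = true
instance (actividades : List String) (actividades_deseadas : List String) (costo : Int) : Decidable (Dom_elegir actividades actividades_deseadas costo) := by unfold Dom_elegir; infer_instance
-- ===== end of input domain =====

-- B replaces A's bounded nested pair-scan (early exit at 3 matches) by a frequency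
-- table of the desired activities plus one accumulating pass over actividades
-- (alternative single-pass formulation via the exact total pair count).

-- ===== PORT A =====
-- inner while: while condicion < 3 and j < len(actividades_deseadas): …
def elegirInner (x : String) (ds : List String) (c : Int) : Int :=
  ds.foldl (fun c2 y => if c2 < 3 && x == y then c2 + 1 else c2) c

def elegir (actividades : List String) (actividades_deseadas : List String) (costo : Int) : Bool :=
  let MAX_COSTO : Int := 8000
  let devolver := false
  if costo ≤ MAX_COSTO then
    let condicion :=
      actividades.foldl
        (fun c x => if c < 3 then elegirInner x actividades_deseadas c else c) 0
    if condicion = 3 then true else devolver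
  else devolver

-- ===== PORT B =====
def elegir_alt (actividades : List String) (actividades_deseadas : List String) (costo : Int) : Bool :=
  if costo > 8000 then false
  else
    let cd : PySem.Dict String Int :=
      actividades_deseadas.foldl (fun d y => d.insert y (d.getD y 0 + 1)) PySem.Dict.empty
    let total : Int := actividades.foldl (fun t x => t + cd.getD x 0) 0
    decide (total ≥ 3)

-- ===== PRECONDITION & SPEC =====
def Spec_elegir (actividades : List String) (actividades_deseadas : List String) (costo : Int) (out : Bool) : Prop := out = elegir_alt actividades actividades_deseadas costo
instance (actividades : List String) (actividades_deseadas : List String) (costo : Int) (out : Bool) : Decidable (Spec_elegir actividades actividades_deseadas costo out) := by unfold Spec_elegir; infer_instance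

-- ===== CLAIM (what is proved, stated in full; the proofs are below) =====
def Claim_equal_elegir : Prop := ∀ (actividades : List String) (actividades_deseadas : List String) (costo : Int), Dom_elegir actividades actividades_deseadas costo → Spec_elegir actividades actividades_deseadas costo (elegir actividades actividades_deseadas costo)

-- ===== LEMMAS AND PROOFS =====

-- A's inner loop clamps the running match count at 3.
theorem elegirInner_eq (x : String) (ds : List String) (c : Int)
    (h0 : 0 ≤ c) (h3 : c ≤ 3) :
    elegirInner x ds c = min (c + ds.count x) 3 := by
  induction ds generalizing c with
  | nil => simp [elegirInner]; omega
  | cons y ys ih =>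
    have step : elegirInner x (y :: ys) c
        = elegirInner x ys (if (decide (c < 3) && (x == y)) = true then c + 1 else c) := rfl
    rw [step]
    by_cases hm : x = y
    · by_cases hc : c < 3
      · rw [if_pos (by simp [hm, hc]), ih (c + 1) (by omega) (by omega),
          show (y :: ys).count x = ys.count x + 1 by simp [hm]]
        push_cast; omega
      · rw [if_neg (by simp [hc]), ih c h0 h3,
          show (y :: ys).count x = ys.count x + 1 by simp [hm]]
        push_cast; omega
    · rw [if_neg (by simp [hm]), ih c h0 h3,
        show (y :: ys).count x = ys.count x by simp [Ne.symm hm]]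

-- A's outer loop clamps the total pair count at 3.
theorem elegirOuter_eq (a ds : List String) (c : Int) (h0 : 0 ≤ c) (h3 : c ≤ 3) :
    a.foldl (fun c x => if c < 3 then elegirInner x ds c else c) c
      = min (c + ((a.map (fun x => (ds.count x : Int))).sum)) 3 := by
  induction a generalizing c with
  | nil => simp; omega
  | cons x xs ih =>
    have hcx : (0:Int) ≤ ds.count x := by positivity
    have hs : (0:Int) ≤ (xs.map (fun x => (ds.count x : Int))).sum :=
      List.sum_nonneg (by intro z hz; simp at hz; obtain ⟨w, _, hw⟩ := hz; omega)
    by_cases hc : c < 3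
    · simp only [List.foldl_cons, if_pos hc, elegirInner_eq x ds c h0 h3]
      rw [ih _ (by omega) (by omega)]
      simp only [List.map_cons, List.sum_cons]
      omega
    · simp only [List.foldl_cons, if_neg hc]
      rw [ih _ h0 h3]
      simp only [List.map_cons, List.sum_cons]
      omega

-- B's accumulating pass computes the exact pair count.
theorem elegirTotal_eq (a ds : List String) (t : Int) :
    a.foldl (fun t x => t + (ds.count x : Int)) t
      = t + ((a.map (fun x => (ds.count x : Int))).sum) := by
  induction a generalizing t with
  | nil => simp
  | cons x xs ih =>
    simp only [List.foldl_cons, List.map_cons, List.sum_cons, ih]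
    ring

-- ===== VERDICT (by name: the statement is the Claim_ definition above) =====
theorem elegir_spec : Claim_equal_elegir := by
  intro a ds costo _
  show elegir a ds costo = elegir_alt a ds costo
  unfold elegir elegir_alt
  rw [PySem.Dict.foldl_insert_getD_add_one_eq_counter]
  have hfun : (fun (t : Int) (x : String) => t + (PySem.Dict.counter ds).getD x 0)
      = fun t x => t + (ds.count x : Int) := by
    funext t x; rw [PySem.Dict.getD_counter]
  by_cases hc : costo ≤ 8000
  · simp only [if_pos hc, if_neg (by omega : ¬ costo > 8000), hfun]
    rw [elegirOuter_eq a ds 0 le_rfl (by omega), elegirTotal_eq a ds 0]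
    split_ifs with hmin
    · symm; rw [decide_eq_true_eq]; omega
    · symm; rw [decide_eq_false_iff_not]; omega
  · simp [if_neg hc, if_pos (by omega : costo > 8000)]
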